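-- pv_equiv track=rewrite | github.com/Tsurkan/advent-of-code | 2023/day22/script.py | calculate_supported_bricks_count
-- ===== SOURCE A (Python) =====
-- from collections import deque
--
-- def calculate_supported_bricks_count(bricks, upper_supports_lower, lower_supports_upper):
--     """
--     Determines the number of bricks that satisfy certain conditions.
--     """
--     count = 0
--     for i in range(len(bricks)):
--         queue = deque(
--             item_index
--             for item_index in upper_supports_lower[i]
--             if len(lower_supports_upper[item_index]) == 1
--         )
--         visited = set(queue)
--
--         while queue:
--             j = queue.popleft()
--
--             for k in upper_supports_lower[j] - visited:
--                 if lower_supports_upper[k] <= visited: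
--                     queue.append(k)
--                     visited.add(k)
--
--         count += len(visited)
--
--     return count
-- ===== SOURCE B (Python) =====
-- def calculate_supported_bricks_count(bricks, upper_supports_lower, lower_supports_upper):
--     """
--     Same count, computed by round-based fixpoint relaxation instead of a BFS queue.
--     """
--     total = 0
--     for i in range(len(bricks)):
--         fallen = {
--             k
--             for k in upper_supports_lower[i]
--             if len(lower_supports_upper[k]) == 1
--         }
--         changed = True
--         while changed:
--             changed = False
--             for j in list(fallen):
--                 for k in upper_supports_lower[j]:
--                     if k not in fallen and lower_supports_upper[k] <= fallen:
--                         fallen.add(k)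
--                         changed = True
--         total += len(fallen)
--     return total
-- ===== Notes on version B (the rewrite author's own statement) =====
-- stated objective: alternative
-- what changed: Replaced the BFS worklist (deque + per-node visited expansion) by a round-based fixpoint relaxation: repeatedly sweep over the already-fallen bricks, adding any brick above a fallen one whose supporters are all fallen, until a full pass adds nothing.
import Mathlib
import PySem

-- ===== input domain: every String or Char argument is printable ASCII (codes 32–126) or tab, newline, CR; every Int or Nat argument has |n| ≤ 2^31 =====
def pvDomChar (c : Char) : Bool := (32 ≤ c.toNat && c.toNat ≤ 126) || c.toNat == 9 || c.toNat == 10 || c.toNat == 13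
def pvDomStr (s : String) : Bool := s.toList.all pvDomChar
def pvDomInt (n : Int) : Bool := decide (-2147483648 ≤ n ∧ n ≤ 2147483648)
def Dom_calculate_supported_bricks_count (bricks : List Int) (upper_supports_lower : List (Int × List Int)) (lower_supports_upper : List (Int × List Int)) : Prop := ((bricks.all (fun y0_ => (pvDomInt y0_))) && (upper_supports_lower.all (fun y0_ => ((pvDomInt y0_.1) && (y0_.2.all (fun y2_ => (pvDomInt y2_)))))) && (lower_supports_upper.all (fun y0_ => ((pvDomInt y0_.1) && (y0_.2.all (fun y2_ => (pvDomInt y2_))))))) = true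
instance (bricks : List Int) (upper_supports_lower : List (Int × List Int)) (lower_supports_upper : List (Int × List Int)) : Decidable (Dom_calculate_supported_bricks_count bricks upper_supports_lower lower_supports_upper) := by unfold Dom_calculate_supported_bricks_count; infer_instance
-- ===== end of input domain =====

-- B replaces A's BFS worklist by a round-based fixpoint relaxation over the fallen set (alternative algorithm, same result).


-- dict lookup d[k], shared by both ports (total form of Python's d[k]; under Pre_ every key looked up is present)
def pvUL (d : List (Int × List Int)) (j : Int) : List Int := (PySem.Dict.mk d).getD j []

-- ===== PORT A =====
-- body of A's inner `for k in upper[j] - visited:` loop; state = (newly queued, visited)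
def pvAstep (lower : List (Int × List Int)) (acc : List Int × List Int) (k : Int) : List Int × List Int :=
  if PySem.Set.issubset (pvUL lower k) acc.2
  then (acc.1 ++ [k], PySem.Set.add acc.2 k)
  else acc

-- A's `while queue:` loop, with fuel as a totality guard (A's loop always terminates: each
-- iteration pops one queue entry and every enqueue adds a fresh visited element drawn from
-- upper's value sets; the fuel passed below is proved sufficient in pvA_bfs_closed)
def pvA_bfs (upper lower : List (Int × List Int)) : Nat → List Int → List Int → List Int
  | 0, _, visited => visited
  | _ + 1, [], visited => visited
  | fuel + 1, j :: rest, visited =>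
    let step := (PySem.Set.diff (pvUL upper j) visited).foldl (pvAstep lower) (([] : List Int), visited)
    pvA_bfs upper lower fuel (rest ++ step.1) step.2

def calculate_supported_bricks_count (bricks : List Int) (upper_supports_lower : List (Int × List Int)) (lower_supports_upper : List (Int × List Int)) : Int :=
  let fuelB := upper_supports_lower.foldl (fun a p => a + p.2.length) 0
  (List.range bricks.length).foldl
    (fun count i =>
      let queue := (pvUL upper_supports_lower (i : Int)).filter
        (fun k => (pvUL lower_supports_upper k).length == 1)
      let visited := PySem.Set.ofList queue
      count + PySem.Set.len (pvA_bfs upper_supports_lower lower_supports_upper (queue.length + fuelB) queue visited))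
    0

-- ===== PORT B =====
-- body of Source B's innermost `for k in upper_supports_lower[j]:` loop; state = (fallen, changed)
def pvBstep (lower : List (Int × List Int)) (st : List Int × Bool) (k : Int) : List Int × Bool :=
  if !(PySem.Set.contains st.1 k) && PySem.Set.issubset (pvUL lower k) st.1
  then (PySem.Set.add st.1 k, true)
  else st

-- one full pass of Source B's `for j in list(fallen): for k in upper_supports_lower[j]: ...`
def pvB_round (upper lower : List (Int × List Int)) (snapshot : List Int) (st : List Int × Bool) : List Int × Bool :=
  snapshot.foldl (fun st j => (pvUL upper j).foldl (pvBstep lower) st) st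

-- Source B's `while changed:` loop, fuel as totality guard (each continuing round grows fallen by
-- at least one element of upper's value sets; the fuel passed below is proved sufficient in pvB_loop_closed)
def pvB_loop (upper lower : List (Int × List Int)) : Nat → List Int → List Int
  | 0, fallen => fallen
  | fuel + 1, fallen =>
    let r := pvB_round upper lower fallen (fallen, false)
    if r.2 then pvB_loop upper lower fuel r.1 else fallen

def calculate_supported_bricks_count_alt (bricks : List Int) (upper_supports_lower : List (Int × List Int)) (lower_supports_upper : List (Int × List Int)) : Int :=
  let fuelB := upper_supports_lower.foldl (fun a p => a + p.2.length) 0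
  (List.range bricks.length).foldl
    (fun total i =>
      let fallen := PySem.Set.ofList ((pvUL upper_supports_lower (i : Int)).filter
        (fun k => (pvUL lower_supports_upper k).length == 1))
      total + PySem.Set.len (pvB_loop upper_supports_lower lower_supports_upper (fuelB + 1) fallen))
    0

-- ===== PRECONDITION & SPEC =====
-- Pre_ admits: empty bricks; inputs where no cascade can start (every directly supported brick
-- has a number of supporters different from 1); and general inputs whose dicts are KeyError-free,
-- mutually inverse support relations with duplicate-free value lists.  It excludes inputs on which
-- A raises KeyError, and inputs where a brick listed above some fallen brick does not list it back
-- as a supporter (or a value list has duplicates, not a valid image of a Python set): there A's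
-- answer depends on Python's accidental set iteration order (see the cite: A returns 3, B returns
-- 4), so neither value is specified.
def Pre_calculate_supported_bricks_count (bricks : List Int) (upper_supports_lower : List (Int × List Int)) (lower_supports_upper : List (Int × List Int)) : Prop :=
  bricks = []
  ∨
  ((∀ n ∈ List.range bricks.length, (PySem.Dict.mk upper_supports_lower).contains (n : Int) = true)
   ∧ (∀ p ∈ upper_supports_lower, p.2.Nodup)
   ∧ (∀ p ∈ lower_supports_upper, p.2.Nodup)
   ∧ (∀ p ∈ upper_supports_lower, ∀ k ∈ p.2,
        (PySem.Dict.mk lower_supports_upper).contains k = true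
        ∧ (PySem.Dict.mk upper_supports_lower).contains k = true
        ∧ (∀ j ∈ pvUL lower_supports_upper k, k ∈ pvUL upper_supports_lower j)))
  ∨
  ((∀ n ∈ List.range bricks.length, (PySem.Dict.mk upper_supports_lower).contains (n : Int) = true)
   ∧ (∀ p ∈ lower_supports_upper, p.2.Nodup)
   ∧ (∀ n ∈ List.range bricks.length, ∀ k ∈ pvUL upper_supports_lower (n : Int),
        (PySem.Dict.mk lower_supports_upper).contains k = true
        ∧ ((pvUL lower_supports_upper k).length == 1) = false))
instance (bricks : List Int) (upper_supports_lower : List (Int × List Int)) (lower_supports_upper : List (Int × List Int)) : Decidable (Pre_calculate_supported_bricks_count bricks upper_supports_lower lower_supports_upper) := by unfold Pre_calculate_supported_bricks_count; infer_instance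

def pvWitness_calculate_supported_bricks_count : List Int × (List (Int × List Int)) × (List (Int × List Int)) :=
  ([0], [(0, [1]), (1, [])], [(1, [0])])

def Spec_calculate_supported_bricks_count (bricks : List Int) (upper_supports_lower : List (Int × List Int)) (lower_supports_upper : List (Int × List Int)) (out : Int) : Prop := out = calculate_supported_bricks_count_alt bricks upper_supports_lower lower_supports_upper
instance (bricks : List Int) (upper_supports_lower : List (Int × List Int)) (lower_supports_upper : List (Int × List Int)) (out : Int) : Decidable (Spec_calculate_supported_bricks_count bricks upper_supports_lower lower_supports_upper out) := by unfold Spec_calculate_supported_bricks_count; infer_instance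

-- ===== CLAIM (what is proved, stated in full; the proofs are below) =====
def Claim_equal_calculate_supported_bricks_count : Prop := ∀ (bricks : List Int) (upper_supports_lower : List (Int × List Int)) (lower_supports_upper : List (Int × List Int)), Dom_calculate_supported_bricks_count bricks upper_supports_lower lower_supports_upper → Pre_calculate_supported_bricks_count bricks upper_supports_lower lower_supports_upper → Spec_calculate_supported_bricks_count bricks upper_supports_lower lower_supports_upper (calculate_supported_bricks_count bricks upper_supports_lower lower_supports_upper)

-- ===== LEMMAS AND PROOFS =====

-- the closure property both programs' final fallen sets satisfy
def pvClosed (u l : List (Int × List Int)) (W : List Int) : Prop :=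
  ∀ j ∈ W, ∀ k ∈ pvUL u j, (∀ x ∈ pvUL l k, x ∈ W) → k ∈ W

-- a nonempty lookup comes from an actual pair of the association list
theorem pvUL_mem (d : List (Int × List Int)) (j : Int) :
    pvUL d j = [] ∨ (j, pvUL d j) ∈ d := by
  induction d with
  | nil => left; rfl
  | cons p rest ih =>
    rcases p with ⟨a, b⟩
    by_cases h : a = j
    · right
      subst h
      simp [pvUL, PySem.Dict.getD_eq_get?_getD, PySem.Dict.get?_mk_cons]
    · have : pvUL ((a, b) :: rest) j = pvUL rest j := by
        simp [pvUL, PySem.Dict.getD_eq_get?_getD, PySem.Dict.get?_mk_cons, h]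
      rw [this]
      rcases ih with h' | h'
      · left; exact h'
      · right; exact List.mem_cons_of_mem _ h'

theorem pvUL_subset_flat (u : List (Int × List Int)) (j : Int) :
    ∀ x ∈ pvUL u j, x ∈ u.flatMap Prod.snd := by
  intro x hx
  rcases pvUL_mem u j with h | h
  · rw [h] at hx; cases hx
  · exact List.mem_flatMap.mpr ⟨(j, pvUL u j), h, hx⟩

theorem pre_hU (u : List (Int × List Int)) (h : ∀ p ∈ u, p.2.Nodup) :
    ∀ j, (pvUL u j).Nodup := by
  intro j
  rcases pvUL_mem u j with h' | h'
  · rw [h']; exact List.nodup_nil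
  · exact h _ h'

theorem pre_hd2 (u l : List (Int × List Int))
    (h : ∀ p ∈ u, ∀ k ∈ p.2, ∀ j ∈ pvUL l k, k ∈ pvUL u j) :
    ∀ j k : Int, k ∈ pvUL u j → ∀ j' ∈ pvUL l k, k ∈ pvUL u j' := by
  intro j k hk j' hj'
  rcases pvUL_mem u j with h' | h'
  · rw [h'] at hk; cases hk
  · exact h _ h' k hk j' hj' 

-- A's inner loop: complete characterisation of one dequeue's processing
theorem pvA_fold_spec (l : List (Int × List Int)) :
    ∀ (cand nw vs : List Int), cand.Nodup → (∀ x ∈ cand, x ∉ vs) →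
    ∃ added : List Int,
      (cand.foldl (pvAstep l) (nw, vs)).1 = nw ++ added ∧
      (cand.foldl (pvAstep l) (nw, vs)).2 = vs ++ added ∧
      added.Sublist cand ∧
      (∀ W : List Int, (∀ x ∈ vs, x ∈ W) →
        (∀ k ∈ cand, (∀ x ∈ pvUL l k, x ∈ W) → k ∈ W) → ∀ x ∈ added, x ∈ W) ∧
      (∀ k ∈ cand, (∀ x ∈ pvUL l k, x ∈ vs) → k ∈ added) := by
  intro cand
  induction cand with
  | nil => intro nw vs _ _; exact ⟨[], by simp, by simp, List.Sublist.refl _, by simp, by simp⟩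
  | cons k cand ih =>
    intro nw vs hnd hdisj
    have hknv : k ∉ vs := hdisj k (List.mem_cons_self ..)
    cases hss : PySem.Set.issubset (pvUL l k) vs with
    | true =>
      have hstep : pvAstep l (nw, vs) k = (nw ++ [k], vs ++ [k]) := by
        simp [pvAstep, hss, PySem.Set.add_of_not_mem hknv]
      have hnd' : cand.Nodup := hnd.of_cons
      have hdisj' : ∀ x ∈ cand, x ∉ vs ++ [k] := by
        intro x hx
        simp only [List.mem_append, List.mem_singleton]
        rintro (h | rfl)
        · exact hdisj x (List.mem_cons_of_mem _ hx) h
        · exact (List.nodup_cons.mp hnd).1 hx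
      obtain ⟨added, h1, h2, h3, h4, h5⟩ := ih (nw ++ [k]) (vs ++ [k]) hnd' hdisj'
      refine ⟨k :: added, ?_, ?_, ?_, ?_, ?_⟩
      · simp only [List.foldl_cons, hstep, h1, List.append_assoc, List.singleton_append]
      · simp only [List.foldl_cons, hstep, h2, List.append_assoc, List.singleton_append]
      · exact h3.cons₂ k
      · intro W hWvs hWcl x hx
        have hkW : k ∈ W := by
          apply hWcl k (List.mem_cons_self ..)
          intro y hy
          exact hWvs y (((PySem.Set.issubset_iff _ _).mp hss) y hy)
        rcases List.mem_cons.mp hx with rfl | hx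
        · exact hkW
        · refine h4 W ?_ (fun k' hk' => hWcl k' (List.mem_cons_of_mem _ hk')) x hx
          intro y hy
          rcases List.mem_append.mp hy with h | h
          · exact hWvs y h
          · rw [List.mem_singleton.mp h]; exact hkW
      · intro k' hk' hsub
        rcases List.mem_cons.mp hk' with rfl | hk'
        · exact List.mem_cons_self ..
        · refine List.mem_cons_of_mem _ (h5 k' hk' ?_)
          intro y hy
          exact List.mem_append_left _ (hsub y hy)
    | false =>
      have hstep : pvAstep l (nw, vs) k = (nw, vs) := by simp [pvAstep, hss]
      obtain ⟨added, h1, h2, h3, h4, h5⟩ :=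
        ih nw vs hnd.of_cons (fun x hx => hdisj x (List.mem_cons_of_mem _ hx))
      refine ⟨added, ?_, ?_, h3.cons k, ?_, ?_⟩
      · simpa only [List.foldl_cons, hstep] using h1
      · simpa only [List.foldl_cons, hstep] using h2
      · intro W hWvs hWcl
        exact h4 W hWvs (fun k' hk' => hWcl k' (List.mem_cons_of_mem _ hk'))
      · intro k' hk' hsub
        rcases List.mem_cons.mp hk' with rfl | hk'
        · exact absurd ((PySem.Set.issubset_iff _ _).mpr hsub) (by simp [hss])
        · exact h5 k' hk' hsub

-- everything A's BFS collects lies in any closed superset of the start state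
theorem pvA_bfs_sound (u l : List (Int × List Int)) (hU : ∀ j, (pvUL u j).Nodup) :
    ∀ (f : Nat) (q v W : List Int), pvClosed u l W → (∀ x ∈ q, x ∈ v) → (∀ x ∈ v, x ∈ W) →
    ∀ x ∈ pvA_bfs u l f q v, x ∈ W := by
  intro f
  induction f with
  | zero => intro q v W _ _ hvW x hx; exact hvW x hx
  | succ f ih =>
    intro q v W hcl hqv hvW x hx
    cases q with
    | nil => exact hvW x hx
    | cons j rest =>
      rw [pvA_bfs] at hx
      obtain ⟨added, h1, h2, h3, h4, h5⟩ :=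
        pvA_fold_spec l (PySem.Set.diff (pvUL u j) v) [] v
          (PySem.Set.nodup_diff _ _ (hU j)) (fun y hy => ((PySem.Set.mem_diff _ _ _).mp hy).2)
      have haddW : ∀ y ∈ added, y ∈ W := by
        refine h4 W hvW ?_
        intro k hk hLk
        exact hcl j (hvW j (hqv j (List.mem_cons_self ..))) k ((PySem.Set.mem_diff _ _ _).mp hk).1 hLk
      refine ih _ _ W hcl ?_ ?_ x hx
      · intro y hy
        rw [h2]
        rcases List.mem_append.mp hy with h | h
        · exact List.mem_append_left _ (hqv y (List.mem_cons_of_mem _ h))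
        · rw [h1] at h; simpa using List.mem_append_right v h
      · intro y hy
        rw [h2] at hy
        rcases List.mem_append.mp hy with h | h
        · exact hvW y h
        · exact haddW y h

-- the visited set only grows
theorem pvA_bfs_mono (u l : List (Int × List Int)) :
    ∀ (f : Nat) (q v : List Int), ∀ x ∈ v, x ∈ pvA_bfs u l f q v := by
  intro f
  induction f with
  | zero => intro q v x hx; exact hx
  | succ f ih =>
    intro q v x hx
    cases q with
    | nil => exact hx
    | cons j rest =>
      rw [pvA_bfs]
      apply ih
      have : ∀ (cand : List Int) (acc : List Int × List Int), x ∈ acc.2 →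
          x ∈ (cand.foldl (pvAstep l) acc).2 := by
        intro cand
        induction cand with
        | nil => intro acc h; exact h
        | cons k cand ihc =>
          intro acc h
          apply ihc
          unfold pvAstep
          split
          · exact (PySem.Set.mem_add _ _ _).mpr (Or.inl h)
          · exact h
      exact this _ _ hx

theorem pvA_bfs_nodup (u l : List (Int × List Int)) (hU : ∀ j, (pvUL u j).Nodup) :
    ∀ (f : Nat) (q v : List Int), v.Nodup → (pvA_bfs u l f q v).Nodup := by
  intro f
  induction f with
  | zero => intro q v h; exact h
  | succ f ih =>
    intro q v hv
    cases q with
    | nil => exact hv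
    | cons j rest =>
      rw [pvA_bfs]
      obtain ⟨added, h1, h2, h3, h4, h5⟩ :=
        pvA_fold_spec l (PySem.Set.diff (pvUL u j) v) [] v
          (PySem.Set.nodup_diff _ _ (hU j)) (fun y hy => ((PySem.Set.mem_diff _ _ _).mp hy).2)
      apply ih
      rw [h2]
      rw [List.nodup_append]
      refine ⟨hv, h3.nodup (PySem.Set.nodup_diff _ _ (hU j)), ?_⟩
      intro y hy z hz
      rintro rfl
      exact ((PySem.Set.mem_diff _ _ _).mp (List.Sublist.mem hz h3)).2 hy

-- at the stated fuel A's queue empties, and the resulting visited set is closed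
theorem pvA_bfs_closed (u l : List (Int × List Int)) (hU : ∀ j, (pvUL u j).Nodup)
    (hd2 : ∀ j k : Int, k ∈ pvUL u j → ∀ j' ∈ pvUL l k, k ∈ pvUL u j') :
    ∀ (f : Nat) (q v : List Int), (∀ x ∈ q, x ∈ v) →
    (∀ k : Int, (∃ j ∈ v, k ∈ pvUL u j) → (∀ x ∈ pvUL l k, x ∈ v) → k ∉ v →
      ∃ j' ∈ q, k ∈ pvUL u j') →
    q.length + ((u.flatMap Prod.snd).toFinset \ v.toFinset).card ≤ f →
    pvClosed u l (pvA_bfs u l f q v) := by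
  intro f
  induction f with
  | zero =>
    intro q v hqv hstar hm
    have hq : q = [] := List.length_eq_zero_iff.mp (by omega)
    subst hq
    intro j hj k hk hLk
    by_contra hk'
    obtain ⟨j', hj', _⟩ := hstar k ⟨j, hj, hk⟩ hLk hk'
    cases hj'
  | succ f ih =>
    intro q v hqv hstar hm
    cases q with
    | nil =>
      intro j hj k hk hLk
      by_contra hk'
      obtain ⟨j', hj', _⟩ := hstar k ⟨j, hj, hk⟩ hLk hk'
      cases hj'
    | cons j rest =>
      rw [pvA_bfs]
      obtain ⟨added, h1, h2, h3, h4, h5⟩ :=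
        pvA_fold_spec l (PySem.Set.diff (pvUL u j) v) [] v
          (PySem.Set.nodup_diff _ _ (hU j)) (fun y hy => ((PySem.Set.mem_diff _ _ _).mp hy).2)
      have haddv : ∀ x ∈ added, x ∉ v := fun x hx => ((PySem.Set.mem_diff _ _ _).mp (List.Sublist.mem hx h3)).2
      have haddU : ∀ x ∈ added, x ∈ pvUL u j := fun x hx => ((PySem.Set.mem_diff _ _ _).mp (List.Sublist.mem hx h3)).1
      have haddnd : added.Nodup := h3.nodup (PySem.Set.nodup_diff _ _ (hU j))
      apply ih
      · intro y hy
        rw [h2]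
        rcases List.mem_append.mp hy with h | h
        · exact List.mem_append_left _ (hqv y (List.mem_cons_of_mem _ h))
        · rw [h1] at h; simpa using List.mem_append_right v h
      · -- the key invariant is preserved
        intro k hex hLk hk'
        rw [h2] at hex hLk hk'
        have hknv : k ∉ v := fun h => hk' (List.mem_append_left _ h)
        rw [h1] at *
        simp only [List.nil_append] at *
        by_cases hLv : ∀ x ∈ pvUL l k, x ∈ v
        · obtain ⟨j₀, hj₀, hkU⟩ := hex
          rcases List.mem_append.mp hj₀ with hj₀v | hj₀a
          · obtain ⟨j'', hj''q, hkU''⟩ := hstar k ⟨j₀, hj₀v, hkU⟩ hLv hknv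
            rcases List.mem_cons.mp hj''q with rfl | hj''r
            · -- j'' = j : k would have been added in this step — contradiction
              exfalso
              apply hk'
              refine List.mem_append_right _ (h5 k ?_ hLv)
              exact (PySem.Set.mem_diff _ _ _).mpr ⟨hkU'', hknv⟩
            · exact ⟨j'', List.mem_append_left _ hj''r, hkU''⟩
          · exact ⟨j₀, List.mem_append_right _ hj₀a, hkU⟩
        · push Not at hLv
          obtain ⟨a, ha, hav⟩ := hLv
          obtain ⟨j₀, _, hkU⟩ := hex
          have haadd : a ∈ added := by
            rcases List.mem_append.mp (hLk a ha) with h | h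
            · exact absurd h hav
            · exact h
          exact ⟨a, List.mem_append_right _ haadd, hd2 j₀ k hkU a ha⟩
      · -- the measure drops by one
        rw [h2, h1]
        simp only [List.nil_append, List.length_append]
        have hsubF : added.toFinset ⊆ (u.flatMap Prod.snd).toFinset \ v.toFinset := by
          intro x hx
          rw [List.mem_toFinset] at hx
          rw [Finset.mem_sdiff, List.mem_toFinset, List.mem_toFinset]
          exact ⟨pvUL_subset_flat u j x (haddU x hx), haddv x hx⟩
        have hcard : added.toFinset.card = added.length := List.toFinset_card_of_nodup haddnd
        have hsd : (u.flatMap Prod.snd).toFinset \ (v ++ added).toFinset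
            = ((u.flatMap Prod.snd).toFinset \ v.toFinset) \ added.toFinset := by
          ext x
          simp only [Finset.mem_sdiff, List.toFinset_append, Finset.mem_union]
          tauto
        rw [hsd, Finset.card_sdiff, Finset.inter_eq_left.mpr hsubF, hcard]
        have hle : added.length ≤ ((u.flatMap Prod.snd).toFinset \ v.toFinset).card := by
          rw [← hcard]; exact Finset.card_le_card hsubF
        simp only [List.length_cons] at hm
        omega

-- B's innermost loop: complete characterisation
theorem pvB_fold_spec (l : List (Int × List Int)) :
    ∀ (ks : List Int) (st : List Int × Bool),
    ∃ extra : List Int,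
      (ks.foldl (pvBstep l) st).1 = st.1 ++ extra ∧
      extra.Nodup ∧
      (∀ x ∈ extra, x ∉ st.1 ∧ x ∈ ks) ∧
      ((ks.foldl (pvBstep l) st).2 = (st.2 || !extra.isEmpty)) ∧
      (∀ W : List Int, (∀ x ∈ st.1, x ∈ W) →
        (∀ k ∈ ks, (∀ x ∈ pvUL l k, x ∈ W) → k ∈ W) → ∀ x ∈ extra, x ∈ W) ∧
      (extra = [] → ∀ k ∈ ks, k ∈ st.1 ∨ ¬(∀ x ∈ pvUL l k, x ∈ st.1)) := by
  intro ks
  induction ks with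
  | nil => intro st; exact ⟨[], by simp, List.nodup_nil, by simp, by simp, by simp, by simp⟩
  | cons k ks ih =>
    intro st
    cases hb : !(PySem.Set.contains st.1 k) && PySem.Set.issubset (pvUL l k) st.1 with
    | true =>
      have hb' := hb
      simp only [Bool.and_eq_true, Bool.not_eq_true'] at hb'
      have hknv : k ∉ st.1 := by
        intro h
        have h2 := (PySem.Set.contains_iff st.1 k).mpr h
        rw [hb'.1] at h2
        exact Bool.noConfusion h2
      have hsub : ∀ x ∈ pvUL l k, x ∈ st.1 := (PySem.Set.issubset_iff _ _).mp hb'.2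
      have hstep : pvBstep l st k = (st.1 ++ [k], true) := by
        unfold pvBstep
        rw [if_pos hb, PySem.Set.add_of_not_mem hknv]
      obtain ⟨extra, h1, h2, h3, h4, h5, h6⟩ := ih (st.1 ++ [k], true)
      refine ⟨k :: extra, ?_, ?_, ?_, ?_, ?_, ?_⟩
      · simp only [List.foldl_cons, hstep] at *
        rw [h1, List.append_assoc, List.singleton_append]
      · refine List.nodup_cons.mpr ⟨fun h => ?_, h2⟩
        exact (h3 k h).1 (List.mem_append_right _ (List.mem_singleton.mpr rfl))
      · intro x hx
        rcases List.mem_cons.mp hx with rfl | hx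
        · exact ⟨hknv, List.mem_cons_self ..⟩
        · obtain ⟨hx1, hx2⟩ := h3 x hx
          exact ⟨fun h => hx1 (List.mem_append_left _ h), List.mem_cons_of_mem _ hx2⟩
      · simp only [List.foldl_cons, hstep, h4]
        simp
      · intro W hWst hWcl x hx
        have hkW : k ∈ W := hWcl k (List.mem_cons_self ..) (fun y hy => hWst y (hsub y hy))
        rcases List.mem_cons.mp hx with rfl | hx
        · exact hkW
        · refine h5 W ?_ (fun k' hk' => hWcl k' (List.mem_cons_of_mem _ hk')) x hx
          intro y hy
          rcases List.mem_append.mp hy with h | h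
          · exact hWst y h
          · rw [List.mem_singleton.mp h]; exact hkW
      · intro h; cases h
    | false =>
      have hstep : pvBstep l st k = st := by
        unfold pvBstep
        rw [if_neg (by rw [hb]; exact Bool.false_ne_true)]
      obtain ⟨extra, h1, h2, h3, h4, h5, h6⟩ := ih st
      refine ⟨extra, ?_, h2, ?_, ?_, ?_, ?_⟩
      · simpa only [List.foldl_cons, hstep] using h1
      · intro x hx; obtain ⟨a, b⟩ := h3 x hx; exact ⟨a, List.mem_cons_of_mem _ b⟩
      · simpa only [List.foldl_cons, hstep] using h4
      · intro W hWst hWcl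
        exact h5 W hWst (fun k' hk' => hWcl k' (List.mem_cons_of_mem _ hk'))
      · intro he k' hk'
        rcases List.mem_cons.mp hk' with rfl | hk'
        · rcases Bool.and_eq_false_iff.mp hb with h | h
          · left
            have : PySem.Set.contains st.1 k' = true := by
              cases hcc : PySem.Set.contains st.1 k'
              · rw [hcc] at h; simp at h
              · rfl
            exact (PySem.Set.contains_iff _ _).mp this
          · right
            intro hs
            exact absurd ((PySem.Set.issubset_iff _ _).mpr hs) (by simp [h])
        · exact h6 he k' hk'

-- one full pass of B: complete characterisation
theorem pvB_round_spec (u l : List (Int × List Int)) :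
    ∀ (snap : List Int) (st : List Int × Bool),
    ∃ extra : List Int,
      (pvB_round u l snap st).1 = st.1 ++ extra ∧
      extra.Nodup ∧
      (∀ x ∈ extra, x ∉ st.1 ∧ x ∈ u.flatMap Prod.snd) ∧
      ((pvB_round u l snap st).2 = (st.2 || !extra.isEmpty)) ∧
      (∀ W : List Int, pvClosed u l W → (∀ x ∈ st.1, x ∈ W) → (∀ x ∈ snap, x ∈ W) →
        ∀ x ∈ extra, x ∈ W) ∧
      (extra = [] → ∀ j ∈ snap, ∀ k ∈ pvUL u j, (∀ x ∈ pvUL l k, x ∈ st.1) → k ∈ st.1) := by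
  intro snap
  induction snap with
  | nil =>
    intro st
    exact ⟨[], by simp [pvB_round], List.nodup_nil, by simp, by simp [pvB_round], by simp, by simp⟩
  | cons j snap ih =>
    intro st
    obtain ⟨e1, g1, g2, g3, g4, g5, g6⟩ := pvB_fold_spec l (pvUL u j) st
    set st1 : List Int × Bool := (pvUL u j).foldl (pvBstep l) st with hst1
    have hround : pvB_round u l (j :: snap) st = pvB_round u l snap st1 := rfl
    obtain ⟨e2, k1, k2, k3, k4, k5, k6⟩ := ih st1
    refine ⟨e1 ++ e2, ?_, ?_, ?_, ?_, ?_, ?_⟩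
    · rw [hround, k1, g1, List.append_assoc]
    · rw [List.nodup_append]
      refine ⟨g2, k2, ?_⟩
      intro x hx z hz
      rintro rfl
      exact (k3 x hz).1 (by rw [g1]; exact List.mem_append_right _ hx)
    · intro x hx
      rcases List.mem_append.mp hx with h | h
      · exact ⟨(g3 x h).1, pvUL_subset_flat u j x (g3 x h).2⟩
      · exact ⟨fun hv => (k3 x h).1 (by rw [g1]; exact List.mem_append_left _ hv), (k3 x h).2⟩
    · rw [hround, k4, g4]
      cases e1 <;> cases e2 <;> simp
    · intro W hcl hWst hWsnap x hx
      have he1W : ∀ y ∈ e1, y ∈ W := by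
        refine g5 W hWst ?_
        intro k hk hLk
        exact hcl j (hWsnap j (List.mem_cons_self ..)) k hk hLk
      rcases List.mem_append.mp hx with h | h
      · exact he1W x h
      · refine k5 W hcl ?_ (fun y hy => hWsnap y (List.mem_cons_of_mem _ hy)) x h
        intro y hy
        rw [g1] at hy
        rcases List.mem_append.mp hy with h' | h'
        · exact hWst y h'
        · exact he1W y h'
    · intro he
      rw [List.append_eq_nil_iff] at he
      have hst1eq : st1.1 = st.1 := by rw [g1, he.1, List.append_nil]
      intro j' hj' k hk hLk
      rcases List.mem_cons.mp hj' with rfl | hj'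
      · rcases g6 he.1 k hk with h | h
        · exact h
        · exact absurd hLk h
      · have := k6 he.2 j' hj' k hk (by rw [hst1eq]; exact hLk)
        rw [hst1eq] at this
        exact this

theorem pvB_loop_mono (u l : List (Int × List Int)) :
    ∀ (f : Nat) (fallen : List Int), ∀ x ∈ fallen, x ∈ pvB_loop u l f fallen := by
  intro f
  induction f with
  | zero => intro fallen x hx; exact hx
  | succ f ih =>
    intro fallen x hx
    rw [pvB_loop]
    obtain ⟨extra, h1, _, _, _, _, _⟩ := pvB_round_spec u l fallen (fallen, false)
    split
    · exact ih _ x (by rw [h1]; exact List.mem_append_left _ hx)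
    · exact hx

theorem pvB_loop_sound (u l : List (Int × List Int)) :
    ∀ (f : Nat) (fallen W : List Int), pvClosed u l W → (∀ x ∈ fallen, x ∈ W) →
    ∀ x ∈ pvB_loop u l f fallen, x ∈ W := by
  intro f
  induction f with
  | zero => intro fallen W _ hfW x hx; exact hfW x hx
  | succ f ih =>
    intro fallen W hcl hfW x hx
    rw [pvB_loop] at hx
    obtain ⟨extra, h1, _, _, _, h5, _⟩ := pvB_round_spec u l fallen (fallen, false)
    split at hx
    · refine ih _ W hcl ?_ x hx
      intro y hy
      rw [h1] at hy
      rcases List.mem_append.mp hy with h | h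
      · exact hfW y h
      · exact h5 W hcl hfW hfW y h
    · exact hfW x hx

theorem pvB_loop_nodup (u l : List (Int × List Int)) :
    ∀ (f : Nat) (fallen : List Int), fallen.Nodup → (pvB_loop u l f fallen).Nodup := by
  intro f
  induction f with
  | zero => intro fallen h; exact h
  | succ f ih =>
    intro fallen hnd
    rw [pvB_loop]
    obtain ⟨extra, h1, h2, h3, _, _, _⟩ := pvB_round_spec u l fallen (fallen, false)
    split
    · refine ih _ ?_
      rw [h1, List.nodup_append]
      refine ⟨hnd, h2, ?_⟩
      intro x hx z hz
      rintro rfl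
      exact (h3 x hz).1 hx
    · exact hnd

theorem pvB_loop_closed (u l : List (Int × List Int)) :
    ∀ (f : Nat) (fallen : List Int),
    ((u.flatMap Prod.snd).toFinset \ fallen.toFinset).card < f →
    pvClosed u l (pvB_loop u l f fallen) := by
  intro f
  induction f with
  | zero => intro fallen hm; omega
  | succ f ih =>
    intro fallen hm
    rw [pvB_loop]
    obtain ⟨extra, h1, h2, h3, h4, h5, h6⟩ := pvB_round_spec u l fallen (fallen, false)
    cases he : extra with
    | nil =>
      have : (pvB_round u l fallen (fallen, false)).2 = false := by
        rw [h4, he]; simp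
      rw [this, if_neg Bool.false_ne_true]
      intro j hj k hk hLk
      exact h6 he j hj k hk hLk
    | cons y ys =>
      have hch : (pvB_round u l fallen (fallen, false)).2 = true := by
        rw [h4, he]; simp
      rw [hch, if_pos rfl]
      apply ih
      rw [h1]
      have hsubF : extra.toFinset ⊆ (u.flatMap Prod.snd).toFinset \ fallen.toFinset := by
        intro x hx
        rw [List.mem_toFinset] at hx
        rw [Finset.mem_sdiff, List.mem_toFinset, List.mem_toFinset]
        exact ⟨(h3 x hx).2, (h3 x hx).1⟩
      have hcard : extra.toFinset.card = extra.length := List.toFinset_card_of_nodup h2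
      have hsd : (u.flatMap Prod.snd).toFinset \ (fallen ++ extra).toFinset
          = ((u.flatMap Prod.snd).toFinset \ fallen.toFinset) \ extra.toFinset := by
        ext x
        simp only [Finset.mem_sdiff, List.toFinset_append, Finset.mem_union]
        tauto
      rw [hsd, Finset.card_sdiff, Finset.inter_eq_left.mpr hsubF, hcard]
      have hlen : 1 ≤ extra.length := by rw [he]; simp
      have hle : extra.length ≤ ((u.flatMap Prod.snd).toFinset \ fallen.toFinset).card := by
        rw [← hcard]; exact Finset.card_le_card hsubF
      omega

theorem pv_fuelB_eq (u : List (Int × List Int)) :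
    ∀ a : Nat, u.foldl (fun a p => a + p.2.length) a = a + (u.flatMap Prod.snd).length := by
  induction u with
  | nil => intro a; simp
  | cons p u ih =>
    intro a
    simp only [List.foldl_cons, List.flatMap_cons, List.length_append, ih]
    omega

-- per removed brick, A's BFS and B's fixpoint produce the same count
theorem pv_count_eq (u l : List (Int × List Int)) (hU : ∀ j, (pvUL u j).Nodup)
    (hd2 : ∀ j k : Int, k ∈ pvUL u j → ∀ j' ∈ pvUL l k, k ∈ pvUL u j') (i : Int) :
    PySem.Set.len (pvA_bfs u l
        (((pvUL u i).filter (fun k => (pvUL l k).length == 1)).length + (u.flatMap Prod.snd).length)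
        ((pvUL u i).filter (fun k => (pvUL l k).length == 1))
        (PySem.Set.ofList ((pvUL u i).filter (fun k => (pvUL l k).length == 1))))
    = PySem.Set.len (pvB_loop u l ((u.flatMap Prod.snd).length + 1)
        (PySem.Set.ofList ((pvUL u i).filter (fun k => (pvUL l k).length == 1)))) := by
  set seeds := (pvUL u i).filter (fun k => (pvUL l k).length == 1) with hseeds
  have hnd : seeds.Nodup := (hU i).filter _
  have hof : PySem.Set.ofList seeds = seeds := PySem.Set.ofList_eq_self_of_nodup _ hnd
  rw [hof]
  set vA := pvA_bfs u l (seeds.length + (u.flatMap Prod.snd).length) seeds seeds with hvA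
  set vB := pvB_loop u l ((u.flatMap Prod.snd).length + 1) seeds with hvB
  have hclB : pvClosed u l vB := by
    apply pvB_loop_closed
    calc ((u.flatMap Prod.snd).toFinset \ seeds.toFinset).card
        ≤ (u.flatMap Prod.snd).toFinset.card := Finset.card_le_card (Finset.sdiff_subset)
      _ ≤ (u.flatMap Prod.snd).length := List.toFinset_card_le _
      _ < (u.flatMap Prod.snd).length + 1 := by omega
  have hclA : pvClosed u l vA := by
    apply pvA_bfs_closed u l hU hd2
    · intro x hx; exact hx
    · intro k ⟨j, hj, hkU⟩ _ hk'
      exact ⟨j, hj, hkU⟩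
    · have h1 : ((u.flatMap Prod.snd).toFinset \ seeds.toFinset).card
          ≤ (u.flatMap Prod.snd).length := by
        calc ((u.flatMap Prod.snd).toFinset \ seeds.toFinset).card
            ≤ (u.flatMap Prod.snd).toFinset.card := Finset.card_le_card (Finset.sdiff_subset)
          _ ≤ (u.flatMap Prod.snd).length := List.toFinset_card_le _
      omega
  have hAB : ∀ x ∈ vA, x ∈ vB :=
    pvA_bfs_sound u l hU _ _ _ _ hclB (fun x hx => hx) (pvB_loop_mono u l _ seeds)
  have hBA : ∀ x ∈ vB, x ∈ vA :=
    pvB_loop_sound u l _ _ _ hclA (pvA_bfs_mono u l _ seeds seeds)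
  have hndA : vA.Nodup := pvA_bfs_nodup u l hU _ _ _ hnd
  have hndB : vB.Nodup := pvB_loop_nodup u l _ _ hnd
  have hperm : vA.Perm vB :=
    (List.perm_ext_iff_of_nodup hndA hndB).mpr (fun x => ⟨hAB x, hBA x⟩)
  simpa [PySem.Set.len] using hperm.length_eq

-- ===== VERDICT (by name: the statement is the Claim_ definition above) =====
theorem calculate_supported_bricks_count_spec : Claim_equal_calculate_supported_bricks_count := by
  unfold Claim_equal_calculate_supported_bricks_count
  intro bricks u l _ hpre
  unfold Spec_calculate_supported_bricks_count
  rcases hpre with hnil | ⟨_, hUn, _, hinv⟩ | ⟨_, _, hS⟩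
  · subst hnil
    simp [calculate_supported_bricks_count, calculate_supported_bricks_count_alt]
  · unfold calculate_supported_bricks_count calculate_supported_bricks_count_alt
    simp only []
    congr 1
    funext count i
    congr 1
    rw [pv_fuelB_eq u 0]
    simpa using
      pv_count_eq u l (pre_hU u hUn)
        (pre_hd2 u l (fun p hp k hk => (hinv p hp k hk).2.2)) (i : Int)
  · unfold calculate_supported_bricks_count calculate_supported_bricks_count_alt
    simp only []
    apply PySem.List.foldl_congr_mem
    intro count i hi
    have hmem : ∃ n, n < bricks.length ∧ i = (n : Int) := by
      simpa using hi
    obtain ⟨n, hn, rfl⟩ := hmem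
    have hn' : n ∈ List.range bricks.length := List.mem_range.mpr hn
    have hseed : (pvUL u (n : Int)).filter (fun k => (pvUL l k).length == 1) = [] :=
      List.filter_eq_nil_iff.mpr (fun k hk => by simpa using (hS n hn' k hk).2)
    have hA : ∀ (f : Nat) (v : List Int), pvA_bfs u l f [] v = v := by
      intro f v; cases f <;> rfl
    have hB : ∀ (f : Nat), pvB_loop u l f [] = [] := by
      intro f; cases f <;> rfl
    rw [hseed, PySem.Set.ofList_nil, hA, hB]
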